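-- pv_equiv track=rewrite | github.com/rookinc/xalchemy_lab2 | zarchive/witness_machine/core.py | word_delta
-- ===== SOURCE A (Python) =====
-- def mod_n(i: int, n: int) -> int:
--     return i % n
--
-- def frame_count(r: int = 1) -> int:
--     if r < 1:
--         raise ValueError("r must be >= 1")
--     return 5 * r
--
-- def word_delta(word: list[str], r: int = 1) -> tuple[int, int]:
--     n = frame_count(r)
--     di = 0
--     dp = 0
--     for op in word:
--         if op == "tau":
--             di += 1
--         elif op == "tau_inv":
--             di -= 1
--         elif op == "mu":
--             dp += 1
--         else:
--             raise ValueError(f"unknown op: {op}")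
--     return (mod_n(di, n), dp % 2)
-- ===== SOURCE B (Python) =====
-- def frame_count(r: int = 1) -> int:
--     if r < 1:
--         raise ValueError("r must be >= 1")
--     return 5 * r
--
-- def word_delta(word: list[str], r: int = 1) -> tuple[int, int]:
--     n = frame_count(r)
--     for op in word:
--         if op not in ("tau", "tau_inv", "mu"):
--             raise ValueError(f"unknown op: {op}")
--     di = word.count("tau") - word.count("tau_inv")
--     dp = word.count("mu")
--     return (di % n, dp % 2)
-- ===== Notes on version B (the rewrite author's own statement) =====
-- stated objective: simpler
-- what changed: Replaces A's fused validate-and-count accumulator loop by a separate ordered validation pass followed by a declarative tally with list.count and a closed-form modular return.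
import Mathlib
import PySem

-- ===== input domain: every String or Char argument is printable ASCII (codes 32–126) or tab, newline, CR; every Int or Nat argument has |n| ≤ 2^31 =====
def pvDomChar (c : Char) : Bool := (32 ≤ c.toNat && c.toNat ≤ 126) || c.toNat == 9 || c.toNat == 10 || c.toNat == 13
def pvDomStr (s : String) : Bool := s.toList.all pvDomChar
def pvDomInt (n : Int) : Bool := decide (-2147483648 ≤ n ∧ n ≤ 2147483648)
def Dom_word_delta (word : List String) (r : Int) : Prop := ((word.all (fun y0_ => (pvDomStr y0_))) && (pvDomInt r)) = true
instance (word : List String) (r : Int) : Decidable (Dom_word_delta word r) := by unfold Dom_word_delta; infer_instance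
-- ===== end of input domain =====

-- B replaces A's fused validate-and-count loop by a validation pass plus a declarative tally
-- (list.count); same cost, simpler decomposition. Equivalence is about the return value on
-- inputs where A returns (r ≥ 1 and every op known); where Python raises, Pre_ excludes.

-- ===== PORT A =====
-- A's loop: accumulate (di, dp); on an unknown op Python RAISES (excluded by Pre_; the
-- port leaves the state unchanged there, a value never claimed about).
def word_delta (word : List String) (r : Int) : Int × Int :=
  let n : Int := 5 * r
  let s := word.foldl (fun (s : Int × Int) op =>
    if op == "tau" then (s.1 + 1, s.2)
    else if op == "tau_inv" then (s.1 - 1, s.2)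
    else if op == "mu" then (s.1, s.2 + 1)
    else s) (0, 0)
  (PySem.Int.mod s.1 n, PySem.Int.mod s.2 2)

-- ===== PORT B =====
-- B's validation pass only raises (excluded by Pre_), so it contributes no value here;
-- the tally is list.count, ported with PySem.List.count.
def word_delta_alt (word : List String) (r : Int) : Int × Int :=
  let n : Int := 5 * r
  let di : Int := (PySem.List.count word "tau" : Int) - (PySem.List.count word "tau_inv" : Int)
  let dp : Int := (PySem.List.count word "mu" : Int)
  (PySem.Int.mod di n, PySem.Int.mod dp 2)

-- ===== PRECONDITION & SPEC =====
-- Pre_ excludes exactly the inputs where Python A raises ValueError: r < 1, or an op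
-- outside {"tau","tau_inv","mu"}.
def Pre_word_delta (word : List String) (r : Int) : Prop :=
  1 ≤ r ∧ ∀ op ∈ word, op = "tau" ∨ op = "tau_inv" ∨ op = "mu"
instance (word : List String) (r : Int) : Decidable (Pre_word_delta word r) := by unfold Pre_word_delta; infer_instance
def pvWitness_word_delta : List String × Int := (["tau", "mu", "tau_inv", "tau"], 2)
def Spec_word_delta (word : List String) (r : Int) (out : Int × Int) : Prop := out = word_delta_alt word r
instance (word : List String) (r : Int) (out : Int × Int) : Decidable (Spec_word_delta word r out) := by unfold Spec_word_delta; infer_instance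

-- ===== CLAIM (what is proved, stated in full; the proofs are below) =====
def Claim_equal_word_delta : Prop := ∀ (word : List String) (r : Int), Dom_word_delta word r → Pre_word_delta word r → Spec_word_delta word r (word_delta word r)

-- ===== LEMMAS AND PROOFS =====
-- A's fold state equals B's counts (holds for every word: the else branch matches no counted op).
theorem word_delta_fold_eq (word : List String) (a b : Int) :
    word.foldl (fun (s : Int × Int) op =>
      if op == "tau" then (s.1 + 1, s.2)
      else if op == "tau_inv" then (s.1 - 1, s.2)
      else if op == "mu" then (s.1, s.2 + 1)
      else s) (a, b)
    = (a + (PySem.List.count word "tau" : Int) - (PySem.List.count word "tau_inv" : Int),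
       b + (PySem.List.count word "mu" : Int)) := by
  induction word generalizing a b with
  | nil => simp [PySem.List.count]
  | cons op tl ih =>
    simp only [List.foldl_cons]
    by_cases h1 : op = "tau"
    · subst h1; rw [if_pos (by simp), ih]
      simp [PySem.List.count, Prod.ext_iff]; ring
    · by_cases h2 : op = "tau_inv"
      · subst h2; rw [if_neg (by simp), if_pos (by simp), ih]
        simp [PySem.List.count, Prod.ext_iff, h1]; ring
      · by_cases h3 : op = "mu"
        · subst h3; rw [if_neg (by simp), if_neg (by simp), if_pos (by simp), ih]
          simp [PySem.List.count, Prod.ext_iff, h1, h2]; ring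
        · rw [if_neg (by simp [h1]), if_neg (by simp [h2]), if_neg (by simp [h3]), ih]
          simp [PySem.List.count, h1, h2, h3]

-- ===== VERDICT (by name: the statement is the Claim_ definition above) =====
theorem word_delta_spec : Claim_equal_word_delta := by
  intro word r _ _
  unfold Spec_word_delta word_delta word_delta_alt
  rw [word_delta_fold_eq]
  norm_num
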